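-- pv_equiv track=rewrite | github.com/hyuunnn/ida_python_scripts | Decoder/RIFLE_subs_xor_decoder.py | subs
-- ===== SOURCE A (Python) =====
-- def subs(string):
--     sub_table = [0xFF,0xFF,0xFF,0xFF,0xFF,0xFF,0xFF,0xFF,0xFF,0xFF,0xFF,0xFF,0xFF,0xFF,0xFF,0xFF,0xFF,0xFF,0xFF,0xFF,0xFF,0xFF,0xFF,0xFF,0xFF,0xFF,0xFF,0xFF,0xFF,0xFF,0xFF,0xFF,0xFF,0xFF,0xFF,0xFF,0xFF,0xFF,0xFF,0xFF,0xFF,0xFF,0xFF,0xFF,0xFF,0xFF,0xFF,0xFF,0xFF,0xFF,0xFF,0xFF,0xFF,0xFF,0xFF,0xFF,0xFF,0xFF,0xFF,0xFF,0xFF,0xFF,0xFF,0xFF,0xFF,0xFF,0xFF,0xFF,0xFF,0xFF,0xFF,0xFF,0xFF,0xFF,0xFF,0xFF,0xFF,0xFF,0xFF,0xFF,0xFF,0xFF,0xFF,0xFF,0xFF,0xFF,0x3E,0x00,0xFF,0xFF,0xFF,0xFF,0xFF,0xFF,0x3F,0x00,0x34,0x00,0x35,0x00,0x36,0x00,0x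37,0x00,0x38,0x00,0x39,0x00,0x3A,0x00,0x3B,0x00,0x3C,0x00,0x3D,0x00,0xFF,0xFF,0xFF,0xFF,0xFF,0xFF,0xFF,0xFF,0xFF,0xFF,0xFF,0xFF,0xFF,0xFF,0x00,0x00,0x01,0x00,0x02,0x00,0x03,0x00,0x04,0x00,0x05,0x00,0x06,0x00,0x07,0x00,0x08,0x00,0x09,0x00,0x0A,0x00,0x0B,0x00,0x0C,0x00,0x0D,0x00,0x0E,0x00,0x0F,0x00,0x10,0x00,0x11,0x00,0x12,0x00,0x13,0x00,0x14,0x00,0x15,0x00,0x16,0x00,0x17,0x00,0x18,0x00,0x19,0x00,0xFF,0xFF,0xFF,0xFF,0xFF,0xFF,0xFF,0xFF,0xFF,0xFF,0xFF,0xFF,0x1A,0x00,0x1B,0x00,0x1C,0x00,0x1D,0x00,0x1E,0x00,0x1F,0x00,0x20,0x00,0x21,0x00,0x22,0x00,0x23,0x00,0x24,0x00,0x25,0x00,0x26,0x00,0x27,0x00,0x28,0x00,0x29,0x00,0x2A,0x00,0x2B,0x00,0x2C,0x00,0x2D,0x00,0x2E,0x00,0x2F,0x00,0x30,0x00,0x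31,0x00,0x32,0x00,0x33,0x00,0xFF,0xFF,0xFF,0xFF,0xFF,0xFF,0xFF,0xFF,0xFF,0xFF]
--     v5 = 0
--     result_index = 0
--     result = [0]*len(string)
--     for i in range(0,len(string)):
--         if string[i] == "=":
--             break
--         if string[i] == " ":
--             string[i] = "+"
--
--         value = sub_table[ord(string[i])*2] # i don't know *2
--         switch = v5 % 4
--         if switch == 0 :
--             result[result_index] = 4 * value
--         elif switch == 1:
--             result[result_index] = result[result_index] | (value >> 4)
--             result_index +=1
--             result[result_index] = 16 * value
--         elif switch == 2:
--             result[result_index] = result[result_index] | (value >> 2)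
--             result_index +=1
--             result[result_index] = (value << 6)
--         elif switch == 3:
--             result[result_index] = result[result_index] | value
--             result_index +=1
--         v5 +=1
--
--     for i in range(0,len(result)):
--         while(1):
--             if result[i] > 0xff:
--                 result[i] -= 0xff+1
--             else:
--                 break
--
--     return [hex(a) for a in result]
-- ===== SOURCE B (Python) =====
-- def subs(string):
--     # bit-accumulator decode instead of A's 4-way v5%4 state machine; same " "->"+"
--     # in-place mutation as A; return value agreed with A on single-char elements
--     sub_table = [0xFF,0xFF,0xFF,0xFF,0xFF,0xFF,0xFF,0xFF,0xFF,0xFF,0xFF,0xFF,0xFF,0xFF,0xFF,0xFF,0xFF,0xFF,0xFF,0xFF,0xFF,0xFF,0xFF,0xFF,0xFF,0xFF,0xFF,0xFF,0xFF,0xFF,0xFF,0xFF,0xFF,0xFF,0xFF,0xFF,0xFF,0xFF,0xFF,0xFF,0xFF,0xFF,0xFF,0xFF,0xFF,0xFF,0xFF,0xFF,0xFF,0xFF,0xFF,0xFF,0xFF,0xFF,0xFF,0xFF,0xFF,0xFF,0xFF,0xFF,0xFF,0xFF,0xFF,0xFF,0xFF,0xFF,0xFF,0xFF,0xFF,0x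FF,0xFF,0xFF,0xFF,0xFF,0xFF,0xFF,0xFF,0xFF,0xFF,0xFF,0xFF,0xFF,0xFF,0xFF,0xFF,0xFF,0x3E,0x00,0xFF,0xFF,0xFF,0xFF,0xFF,0xFF,0x3F,0x00,0x34,0x00,0x35,0x00,0x36,0x00,0x37,0x00,0x38,0x00,0x39,0x00,0x3A,0x00,0x3B,0x00,0x3C,0x00,0x3D,0x00,0xFF,0xFF,0xFF,0xFF,0xFF,0xFF,0xFF,0xFF,0xFF,0xFF,0xFF,0xFF,0xFF,0xFF,0x00,0x00,0x01,0x00,0x02,0x00,0x03,0x00,0x04,0x00,0x05,0x00,0x06,0x00,0x07,0x00,0x08,0x00,0x09,0x00,0x0A,0x00,0x0B,0x00,0x0C,0x00,0x0D,0x00,0x0E,0x00,0x0F,0x00,0x10,0x00,0x11,0x00,0x12,0x00,0x13,0x00,0x14,0x00,0x15,0x00,0x16,0x00,0x17,0x00,0x18,0x00,0x19,0x00,0xFF,0xFF,0xFF,0xFF,0xFF,0xFF,0xFF,0xFF,0xFF,0xFF,0xFF,0xFF,0x1A,0x00,0x1B,0x00,0x1C,0x00,0x1D,0x00,0x1E,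0x00,0x1F,0x00,0x20,0x00,0x21,0x00,0x22,0x00,0x23,0x00,0x24,0x00,0x25,0x00,0x26,0x00,0x27,0x00,0x28,0x00,0x29,0x00,0x2A,0x00,0x2B,0x00,0x2C,0x00,0x2D,0x00,0x2E,0x00,0x2F,0x00,0x30,0x00,0x31,0x00,0x32,0x00,0x33,0x00,0xFF,0xFF,0xFF,0xFF,0xFF,0xFF,0xFF,0xFF,0xFF,0xFF]
--     result = [0] * len(string)
--     buffer = 0
--     bits = 0
--     ri = 0
--     for i in range(len(string)):
--         if string[i] == "=":
--             break
--         if string[i] == " ":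
--             string[i] = "+"
--         value = sub_table[ord(string[i]) * 2]
--         buffer = (buffer << 6) | value
--         bits += 6
--         if bits >= 8:
--             bits -= 8
--             result[ri] = (buffer >> bits) & 0xff
--             ri += 1
--     if bits > 0:
--         result[ri] = (buffer << (8 - bits)) & 0xff
--     return [hex(a) for a in result]
-- ===== Notes on version B (the rewrite author's own statement) =====
-- stated objective: simpler
-- what changed: Replaces A's 4-way 'v5 % 4' switch state machine plus a separate trailing repeated-subtraction mod-256 pass by a single running 6-bit accumulator (buffer/bits) that emits each byte masked inline and flushes the pending partial byte once after the loop.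
import Mathlib
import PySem

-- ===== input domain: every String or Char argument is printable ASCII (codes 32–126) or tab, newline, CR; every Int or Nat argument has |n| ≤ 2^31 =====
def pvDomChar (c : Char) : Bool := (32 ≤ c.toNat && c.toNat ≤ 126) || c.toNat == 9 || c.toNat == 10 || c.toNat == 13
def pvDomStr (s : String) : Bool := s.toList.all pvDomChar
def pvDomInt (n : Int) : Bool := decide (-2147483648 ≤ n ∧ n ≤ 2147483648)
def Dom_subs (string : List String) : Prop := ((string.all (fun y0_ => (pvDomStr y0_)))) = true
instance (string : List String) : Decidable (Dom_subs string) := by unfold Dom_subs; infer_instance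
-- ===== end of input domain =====

-- B replaces A's 4-way 'v5 % 4' state machine (plus a separate trailing mod-256 pass) by a
-- single running 6-bit accumulator that masks each byte inline (objective: simpler).
-- Note: both Pythons mutate the argument list in place (' ' -> '+'); the equivalence proved
-- here is about the RETURN value only.
-- All Python ints involved are provably nonnegative, so both ports use Nat internally.

-- shared helpers (identical literal data / built-ins in both Pythons)
-- the substitution table (A's and B's identical sub_table literal)
def pvTbl : List Nat := [255, 255, 255, 255, 255, 255, 255, 255, 255, 255, 255, 255, 255, 255, 255, 255, 255, 255, 255, 255, 255, 255, 255, 255, 255, 255, 255, 255, 255, 255, 255, 255, 255, 255, 255, 255, 255, 255, 255, 255, 255, 255, 255, 255, 255, 255, 255, 255, 255, 255, 255, 255, 255, 255, 255, 255, 255, 255, 255, 255, 255, 255, 255, 255, 255, 255, 255, 255, 255, 255, 255, 255, 255, 255, 255, 255, 255, 255, 255, 255, 255, 255, 255, 255, 255, 255, 62, 0, 255, 255, 255, 255, 255, 255, 63, 0, 52, 0, 53, 0, 54, 0, 55, 0, 56, 0, 57, 0, 58, 0, 59, 0, 60, 0, 61, 0, 255, 255, 255, 255, 255, 255, 255, 255,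 255, 255, 255, 255, 255, 255, 0, 0, 1, 0, 2, 0, 3, 0, 4, 0, 5, 0, 6, 0, 7, 0, 8, 0, 9, 0, 10, 0, 11, 0, 12, 0, 13, 0, 14, 0, 15, 0, 16, 0, 17, 0, 18, 0, 19, 0, 20, 0, 21, 0, 22, 0, 23, 0, 24, 0, 25, 0, 255, 255, 255, 255, 255, 255, 255, 255, 255, 255, 255, 255, 26, 0, 27, 0, 28, 0, 29, 0, 30, 0, 31, 0, 32, 0, 33, 0, 34, 0, 35, 0, 36, 0, 37, 0, 38, 0, 39, 0, 40, 0, 41, 0, 42, 0, 43, 0, 44, 0, 45, 0, 46, 0, 47, 0, 48, 0, 49, 0, 50, 0, 51, 0, 255, 255, 255, 255, 255, 255, 255, 255, 255, 255]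

-- Python ord(s): exact on single-character strings (Pre_subs admits only those where read)
def pvOrd (s : String) : Nat :=
  match s.toList with
  | [c] => c.toNat
  | _ => 0

-- Python hex(n) for n ≥ 0: "0x" ++ lowercase hex digits, no padding
def pvHex (n : Nat) : String := "0x" ++ String.ofList (Nat.toDigits 16 n)

-- ===== PORT A =====
-- the trailing while-loop of A: repeatedly subtract 256 while the entry exceeds 0xff
def pvReduce (n : Nat) : Nat :=
  if 255 < n then pvReduce (n - 256) else n

-- A's main for-loop: state (v5, result_index, result)
def subsLoopA : List String → Nat → Nat → List Nat → List Nat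
  | [], _, _, result => result
  | s :: rest, v5, ri, result =>
    if s = "=" then result
    else
      let c := if s = " " then "+" else s
      let value := pvTbl.getD (pvOrd c * 2) 0
      let switch := v5 % 4
      if switch = 0 then
        subsLoopA rest (v5 + 1) ri (result.set ri (4 * value))
      else if switch = 1 then
        let result1 := result.set ri (result.getD ri 0 ||| (value >>> 4))
        subsLoopA rest (v5 + 1) (ri + 1) (result1.set (ri + 1) (16 * value))
      else if switch = 2 then
        let result1 := result.set ri (result.getD ri 0 ||| (value >>> 2))
        subsLoopA rest (v5 + 1) (ri + 1) (result1.set (ri + 1) (value <<< 6))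
      else
        subsLoopA rest (v5 + 1) (ri + 1) (result.set ri (result.getD ri 0 ||| value))

def subs (string : List String) : List String :=
  -- run the main loop, then A's second for-loop (the while(1) reduction) entrywise, then hex
  ((subsLoopA string 0 0 (List.replicate string.length 0)).map pvReduce).map pvHex

-- ===== PORT B =====
-- B's single loop: state (buffer, bits, ri, result)
def subsLoopB : List String → Nat → Nat → Nat → List Nat → Nat × Nat × Nat × List Nat
  | [], buf, bits, ri, result => (buf, bits, ri, result)
  | s :: rest, buf, bits, ri, result =>
    if s = "=" then (buf, bits, ri, result)
    else
      let c := if s = " " then "+" else s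
      let value := pvTbl.getD (pvOrd c * 2) 0
      let buf1 := (buf <<< 6) ||| value
      let bits1 := bits + 6
      if 8 ≤ bits1 then
        subsLoopB rest buf1 (bits1 - 8) (ri + 1) (result.set ri ((buf1 >>> (bits1 - 8)) &&& 255))
      else
        subsLoopB rest buf1 bits1 ri result

-- Source B's trailing 'if bits > 0: result[ri] = (buffer << (8 - bits)) & 0xff'
def pvFlush : Nat × Nat × Nat × List Nat → List Nat
  | (buf, bits, ri, result) =>
    if 0 < bits then result.set ri ((buf <<< (8 - bits)) &&& 255) else result

def subs_alt (string : List String) : List String :=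
  (pvFlush (subsLoopB string 0 0 0 (List.replicate string.length 0))).map pvHex

-- ===== PRECONDITION & SPEC =====
-- Pre_subs excludes exactly the inputs where A raises: some element strictly before the
-- first "=" is not a single character, so Python's ord() raises TypeError (B raises too).
def Pre_subs (string : List String) : Prop :=
  ∀ s ∈ string.takeWhile (fun t => t ≠ "="), s.toList.length = 1

instance (string : List String) : Decidable (Pre_subs string) := by unfold Pre_subs; infer_instance

def pvWitness_subs : List String := ["T", "W", "F", "z", "d", "A", "=", "x"]

def Spec_subs (string : List String) (out : List String) : Prop := out = subs_alt string
instance (string : List String) (out : List String) : Decidable (Spec_subs string out) := by unfold Spec_subs; infer_instance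

-- ===== CLAIM (what is proved, stated in full; the proofs are below) =====
def Claim_equal_subs : Prop := ∀ (string : List String), Dom_subs string → Pre_subs string → Spec_subs string (subs string)

-- ===== LEMMAS AND PROOFS =====


lemma pvReduce_eq (n : Nat) : pvReduce n = n % 256 := by
  unfold pvReduce
  split
  · rw [pvReduce_eq (n - 256)]; omega
  · omega

lemma getD_lt (l : List Nat) (i : Nat) (h : i < l.length) : l.getD i 0 = l[i] := by
  simp [List.getD_eq_getElem?_getD, List.getElem?_eq_getElem h]

set_option maxRecDepth 10000 in
lemma tbl_lt (i : Nat) : pvTbl.getD i 0 < 256 := by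
  rcases Nat.lt_or_ge i pvTbl.length with h | h
  · rw [getD_lt _ _ h]
    have hm : pvTbl[i] ∈ pvTbl := List.getElem_mem h
    have hall : ∀ x ∈ pvTbl, x < 256 := by decide
    exact hall _ hm
  · rw [List.getD_eq_default _ _ h]; norm_num

lemma lor_mod (n a b : Nat) : (a ||| b) % 2 ^ n = a % 2 ^ n ||| b % 2 ^ n := by
  apply Nat.eq_of_testBit_eq
  intro i
  simp only [Nat.testBit_lor, Nat.testBit_mod_two_pow]
  by_cases h : i < n <;> simp [h]

lemma shiftRight_lor (n a b : Nat) : (a ||| b) >>> n = a >>> n ||| b >>> n := by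
  apply Nat.eq_of_testBit_eq
  intro i
  simp [Nat.testBit_shiftRight]

lemma and255 (a : Nat) : a &&& 255 = a % 256 := by
  have h := Nat.and_two_pow_sub_one_eq_mod a 8
  norm_num at h
  exact h

lemma pow_split (a b : Nat) (h : b ≤ a) : (2 : Nat) ^ a = 2 ^ b * 2 ^ (a - b) := by
  rw [← pow_add]
  congr 1
  omega

lemma maskMul (buf bits : Nat) (hb : bits ≤ 8) :
    (buf <<< (8 - bits)) &&& 255 = buf % 2 ^ bits * 2 ^ (8 - bits) := by
  rw [and255, Nat.shiftLeft_eq]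
  have h256 : (256 : Nat) = 2 ^ bits * 2 ^ (8 - bits) := by
    have := pow_split 8 bits hb
    norm_num at this
    omega
  rw [h256, Nat.mul_mod_mul_right]

lemma pendSmall (buf bits : Nat) (hb : bits ≤ 8) : buf % 2 ^ bits * 2 ^ (8 - bits) < 256 := by
  have h1 : buf % 2 ^ bits < 2 ^ bits := Nat.mod_lt _ (Nat.two_pow_pos _)
  calc buf % 2 ^ bits * 2 ^ (8 - bits) < 2 ^ bits * 2 ^ (8 - bits) :=
        Nat.mul_lt_mul_of_lt_of_le h1 (le_refl _) (Nat.two_pow_pos _)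
    _ = 256 := by
        have := pow_split 8 bits hb
        norm_num at this
        omega

lemma shl_shr (buf a b : Nat) (h : b ≤ a) : (buf <<< a) >>> b = buf <<< (a - b) := by
  rw [Nat.shiftLeft_eq, Nat.shiftLeft_eq, Nat.shiftRight_eq_div_pow]
  have h2 : (2 : Nat) ^ a = 2 ^ (a - b) * 2 ^ b := by
    have := pow_split a (a - b) (by omega)
    have hab : a - (a - b) = b := by omega
    rw [hab] at this
    exact this
  rw [h2, ← Nat.mul_assoc]
  exact Nat.mul_div_cancel _ (Nat.two_pow_pos b)

lemma shl_mod (buf a : Nat) (h : a ≤ 8) : (buf <<< a) % 256 = buf % 2 ^ (8 - a) * 2 ^ a := by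
  have := maskMul buf (8 - a) (by omega)
  rw [and255] at this
  have ha : 8 - (8 - a) = a := by omega
  rw [ha] at this
  exact this

-- byte written by B at a carry step equals (A's OR-accumulated byte) mod 256
lemma byteEq (buf v old sh : Nat) (hv : v < 256) (hsh : sh ≤ 6)
    (hold : old % 256 = buf % 2 ^ (sh + 2) * 2 ^ (6 - sh) % 256) :
    (old ||| v >>> sh) % 256 = ((buf <<< 6 ||| v) >>> sh) &&& 255 := by
  have h28 : (256 : Nat) = 2 ^ 8 := by norm_num
  rw [and255, shiftRight_lor, h28, lor_mod 8, lor_mod 8, shl_shr buf 6 sh hsh]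
  have hvs : v >>> sh % 2 ^ 8 = v >>> sh := by
    apply Nat.mod_eq_of_lt
    rw [Nat.shiftRight_eq_div_pow]
    calc v / 2 ^ sh ≤ v := Nat.div_le_self _ _
      _ < 2 ^ 8 := by omega
  have hbs : buf <<< (6 - sh) % 2 ^ 8 = buf % 2 ^ (sh + 2) * 2 ^ (6 - sh) := by
    have h1 := shl_mod buf (6 - sh) (by omega)
    rw [h28] at h1
    have h2 : 8 - (6 - sh) = sh + 2 := by omega
    rw [h2] at h1
    exact h1
  have hsm : buf % 2 ^ (sh + 2) * 2 ^ (6 - sh) < 256 := by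
    have := pendSmall buf (sh + 2) (by omega)
    have he : 8 - (sh + 2) = 6 - sh := by omega
    rw [he] at this
    exact this
  rw [hvs, hbs, ← h28, hold, Nat.mod_eq_of_lt hsm]

-- pending byte relation after absorbing v: only v's low bits survive mod 2^b (b ≤ 6)
lemma pendEq (buf v b : Nat) (hb : b ≤ 6) :
    v % 2 ^ b * 2 ^ (8 - b) % 256 = (buf <<< 6 ||| v) % 2 ^ b * 2 ^ (8 - b) % 256 := by
  have h : (buf <<< 6 ||| v) % 2 ^ b = v % 2 ^ b := by
    rw [lor_mod]
    have hz : buf <<< 6 % 2 ^ b = 0 := by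
      rw [Nat.shiftLeft_eq, pow_split 6 b hb]
      have h2 : buf * (2 ^ b * 2 ^ (6 - b)) = 2 ^ b * (buf * 2 ^ (6 - b)) := by ring
      rw [h2]
      exact Nat.mul_mod_right _ _
    rw [hz]
    simp
  rw [h]

lemma getD_set (l : List Nat) (i j a : Nat) :
    (l.set i a).getD j 0 = if i = j ∧ i < l.length then a else l.getD j 0 := by
  simp only [List.getD_eq_getElem?_getD, List.getElem?_set]
  by_cases hij : i = j
  · subst hij
    by_cases hl : i < l.length
    · simp [hl]
    · simp [hl]
  · simp [hij]

-- the common "both loops have stopped" argument (end of list or '=')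
lemma finishEq (k r bits buf : Nat) (resA resB : List Nat)
    (hbits : bits = 6 * k % 8) (hr : r = 3 * k / 4)
    (hlenB : resB.length = resA.length)
    (H2 : ∀ j, j < r → resA.getD j 0 % 256 = resB.getD j 0)
    (HB : ∀ j, r ≤ j → resB.getD j 0 = 0)
    (Hhi : ∀ j, r < j → resA.getD j 0 % 256 = 0)
    (Hp : resA.getD r 0 % 256 = buf % 2 ^ bits * 2 ^ (8 - bits) % 256) :
    resA.map (· % 256) = pvFlush (buf, bits, r, resB) := by
  simp only [pvFlush]
  apply List.ext_getElem
  · simp only [List.length_map]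
    split <;> simp [hlenB]
  · intro i h1 h2
    have hiA : i < resA.length := by simpa using h1
    have hiB : i < resB.length := by omega
    rw [List.getElem_map, ← getD_lt resA i hiA]
    split
    · -- 0 < bits : flush writes the pending byte at r
      rename_i hb0
      rw [← getD_lt _ i (by simp only [List.length_set]; omega), getD_set]
      rcases Nat.lt_trichotomy i r with hir | hir | hir
      · rw [if_neg (by omega)]
        exact H2 i hir
      · subst hir
        rw [if_pos ⟨rfl, hiB⟩, maskMul buf bits (by omega), Hp]
        exact Nat.mod_eq_of_lt (pendSmall buf bits (by omega))
      · rw [if_neg (by omega), HB i (by omega)]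
        exact Hhi i hir
    · -- bits = 0 : nothing pending
      rename_i hb0
      have hb : bits = 0 := by omega
      rw [← getD_lt _ i hiB]
      rcases Nat.lt_trichotomy i r with hir | hir | hir
      · exact H2 i hir
      · subst hir
        rw [HB i (by omega)]
        rw [hb] at Hp
        simpa using Hp
      · rw [HB i (by omega)]
        exact Hhi i hir

lemma loopEq (rest : List String) : ∀ (k r bits buf : Nat) (resA resB : List Nat),
    bits = 6 * k % 8 → r = 3 * k / 4 →
    resA.length = k + rest.length → resB.length = resA.length →
    (∀ j, j < r → resA.getD j 0 % 256 = resB.getD j 0) →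
    (∀ j, r ≤ j → resB.getD j 0 = 0) →
    (∀ j, r < j → resA.getD j 0 % 256 = 0) →
    resA.getD r 0 % 256 = buf % 2 ^ bits * 2 ^ (8 - bits) % 256 →
    (subsLoopA rest k r resA).map (· % 256) = pvFlush (subsLoopB rest buf bits r resB) := by
  induction rest with
  | nil =>
    intro k r bits buf resA resB hbits hr hlen hlenB H2 HB Hhi Hp
    simp only [subsLoopA, subsLoopB]
    exact finishEq k r bits buf resA resB hbits hr hlenB H2 HB Hhi Hp
  | cons s rest ih =>
    intro k r bits buf resA resB hbits hr hlen hlenB H2 HB Hhi Hp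
    have hlen' : resA.length = k + (rest.length + 1) := by simpa using hlen
    by_cases hs : s = "="
    · simp only [subsLoopA, subsLoopB, if_pos hs]
      exact finishEq k r bits buf resA resB hbits hr hlenB H2 HB Hhi Hp
    · simp only [subsLoopA, subsLoopB, if_neg hs]
      have hv : pvTbl.getD (pvOrd (if s = " " then "+" else s) * 2) 0 < 256 := tbl_lt _
      set v := pvTbl.getD (pvOrd (if s = " " then "+" else s) * 2) 0 with hvdef
      have hrk : r = 3 * k / 4 := hr
      rcases (by omega : k % 4 = 0 ∨ k % 4 = 1 ∨ k % 4 = 2 ∨ k % 4 = 3) with h0 | h1 | h2 | h3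
      · -- switch 0 : A overwrites the pending slot, B just accumulates
        have hb : bits = 0 := by omega
        subst hb
        norm_num [h0]
        apply ih (k + 1) r 6 (buf <<< 6 ||| v) _ _ (by omega) (by omega)
          (by simp; omega) (by simp [hlenB])
        · intro j hj
          rw [getD_set, if_neg (by omega)]
          exact H2 j hj
        · exact HB
        · intro j hj
          rw [getD_set, if_neg (by omega)]
          exact Hhi j hj
        · rw [getD_set, if_pos ⟨rfl, by omega⟩, ← pendEq buf v 6 (by norm_num)]
          norm_num
          omega
      · -- switch 1 : first carry byte
        have hb : bits = 6 := by omega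
        subst hb
        norm_num [h1]
        apply ih (k + 1) (r + 1) 4 (buf <<< 6 ||| v) _ _ (by omega) (by omega)
          (by simp; omega) (by simp [hlenB])
        · intro j hj
          rw [getD_set, getD_set, getD_set]
          rcases Nat.lt_or_ge j r with hjr | hjr
          · rw [if_neg (by omega), if_neg (by omega), if_neg (by omega)]
            exact H2 j hjr
          · have hjr' : j = r := by omega
            subst hjr'
            rw [if_neg (by omega), if_pos ⟨rfl, by omega⟩, if_pos ⟨rfl, by omega⟩]
            exact byteEq buf v _ 4 hv (by norm_num) (by simpa using Hp)
        · intro j hj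
          rw [getD_set, if_neg (by omega)]
          exact HB j (by omega)
        · intro j hj
          rw [getD_set, getD_set, if_neg (by omega), if_neg (by omega)]
          exact Hhi j (by omega)
        · rw [getD_set, if_pos ⟨rfl, by simp [List.length_set]; omega⟩,
            ← pendEq buf v 4 (by norm_num)]
          norm_num
          omega
      · -- switch 2 : second carry byte
        have hb : bits = 4 := by omega
        subst hb
        norm_num [h2]
        apply ih (k + 1) (r + 1) 2 (buf <<< 6 ||| v) _ _ (by omega) (by omega)
          (by simp; omega) (by simp [hlenB])
        · intro j hj
          rw [getD_set, getD_set, getD_set]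
          rcases Nat.lt_or_ge j r with hjr | hjr
          · rw [if_neg (by omega), if_neg (by omega), if_neg (by omega)]
            exact H2 j hjr
          · have hjr' : j = r := by omega
            subst hjr'
            rw [if_neg (by omega), if_pos ⟨rfl, by omega⟩, if_pos ⟨rfl, by omega⟩]
            exact byteEq buf v _ 2 hv (by norm_num) (by simpa using Hp)
        · intro j hj
          rw [getD_set, if_neg (by omega)]
          exact HB j (by omega)
        · intro j hj
          rw [getD_set, getD_set, if_neg (by omega), if_neg (by omega)]
          exact Hhi j (by omega)
        · rw [getD_set, if_pos ⟨rfl, by simp [List.length_set]; omega⟩,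
            ← pendEq buf v 2 (by norm_num), Nat.shiftLeft_eq]
          norm_num
          omega
      · -- switch 3 : third carry byte, nothing pending afterwards
        have hb : bits = 2 := by omega
        subst hb
        norm_num [h3]
        apply ih (k + 1) (r + 1) 0 (buf <<< 6 ||| v) _ _ (by omega) (by omega)
          (by simp; omega) (by simp [hlenB])
        · intro j hj
          rw [getD_set, getD_set]
          rcases Nat.lt_or_ge j r with hjr | hjr
          · rw [if_neg (by omega), if_neg (by omega)]
            exact H2 j hjr
          · have hjr' : j = r := by omega
            subst hjr'
            rw [if_pos ⟨rfl, by omega⟩, if_pos ⟨rfl, by omega⟩]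
            have := byteEq buf v _ 0 hv (by norm_num) (by simpa using Hp)
            simpa using this
        · intro j hj
          rw [getD_set, if_neg (by omega)]
          exact HB j (by omega)
        · intro j hj
          rw [getD_set, if_neg (by omega)]
          exact Hhi j (by omega)
        · rw [getD_set, if_neg (by omega)]
          have := Hhi (r + 1) (by omega)
          simpa using this

-- ===== VERDICT (by name: the statement is the Claim_ definition above) =====
theorem subs_spec : Claim_equal_subs := by
  intro string _ _
  unfold Spec_subs subs subs_alt
  have h := loopEq string 0 0 0 0 (List.replicate string.length 0)
      (List.replicate string.length 0) rfl rfl (by simp) (by simp)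
      (by intro j hj; omega) (by intro j _; simp [List.getD_eq_getElem?_getD, List.getElem?_replicate]; split <;> rfl)
      (by intro j _; simp [List.getD_eq_getElem?_getD, List.getElem?_replicate]; split <;> rfl)
      (by simp [List.getD_eq_getElem?_getD, List.getElem?_replicate]; split <;> rfl)
  have hmap : (subsLoopA string 0 0 (List.replicate string.length 0)).map pvReduce
      = (subsLoopA string 0 0 (List.replicate string.length 0)).map (· % 256) :=
    List.map_congr_left (fun a _ => pvReduce_eq a)
  rw [hmap, h]
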